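-- pv_equiv track=rewrite | github.com/FilipJQ77/NiDUC2---projekt | hamming.py | encode_hamming
-- ===== SOURCE A (Python) =====
-- def encode_hamming(bits: list) -> list:
--     bits_amount = len(bits)
--     index = 1
--     # adding parity bits in correct places to the list
--     while index <= bits_amount:
--         bits.insert(index - 1, 0)
--         bits_amount += 1
--         index *= 2
--     # algorithm step 5
--     index = 1
--     while index <= bits_amount:
--         i = index
--         summ = 0
--         while i <= bits_amount:
--             for j in range(index):
--                 # todo ten if jest po to że jeśli mamy ucięty kod hamminga to nie wiemy kiedy jest koniec danych
--                 if i <= bits_amount: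
--                     summ += bits[i - 1]
--                     i += 1
--             i += index
--         bits[index - 1] = summ % 2
--         index *= 2
--     # po zakodowaniu wiadomosci zwyklym hammingiem dodajemy na koniec dodatkowy bit parzystosci (SECDED)
--     summ = 0
--     for i in range(bits_amount):
--         summ += bits[i]
--     bits.append(summ % 2)
--     return bits
-- ===== SOURCE B (Python) =====
-- def encode_hamming(bits: list) -> list:
--     # same in-place mutation as A: parity-bit slots inserted, then filled, then SECDED bit appended
--     n = len(bits)
--     index = 1
--     while index <= n:
--         bits.insert(index - 1, 0)
--         n += 1
--         index *= 2
--     p = 1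
--     while p <= n:
--         # direct bitmask membership test replaces A's block-structured nested while/for gather
--         bits[p - 1] = sum(bits[i - 1] for i in range(1, n + 1) if i & p) % 2
--         p *= 2
--     bits.append(sum(bits) % 2)
--     return bits
-- ===== Notes on version B (the rewrite author's own statement) =====
-- stated objective: simpler
-- what changed: A's triple-nested block-walking gather loop (while/while/for with truncation guard) per parity bit is replaced by a one-line sum over indices selected by the bitmask test i & p, and the final SECDED bit by sum(bits); insertion loop and in-place mutation are kept.
import Mathlib
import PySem

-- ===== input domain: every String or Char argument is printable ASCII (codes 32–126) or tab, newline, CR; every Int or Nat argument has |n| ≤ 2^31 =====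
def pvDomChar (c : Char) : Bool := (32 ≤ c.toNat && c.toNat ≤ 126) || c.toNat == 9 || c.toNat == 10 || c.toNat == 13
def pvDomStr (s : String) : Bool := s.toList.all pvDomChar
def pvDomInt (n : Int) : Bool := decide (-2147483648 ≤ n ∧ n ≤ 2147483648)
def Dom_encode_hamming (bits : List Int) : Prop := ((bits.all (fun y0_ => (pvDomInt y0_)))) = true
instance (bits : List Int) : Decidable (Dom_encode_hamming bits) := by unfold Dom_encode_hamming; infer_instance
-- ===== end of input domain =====

-- B replaces A's triple-nested block-walking gather per parity bit by a direct bitmask-filtered sum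
-- (and the final SECDED loop by a plain fold over the list); both mutate the list the same way in
-- Python — the equivalence proved here is about the returned list (which is that same mutated list).

-- ===== PORT A =====
-- insertion loop 'while index <= bits_amount: bits.insert(index-1, 0); …'
-- (fuel: index doubles while bits_amount grows by 1, so length+2 steps always suffice;
--  index-1 ≤ current length, where Python's list.insert is exactly List.insertIdx)
def pvInsA : Nat → Nat → Nat → List Int → List Int × Nat
  | 0, n, _, bits => (bits, n)
  | f+1, n, idx, bits =>
    if idx ≤ n then pvInsA f (n+1) (idx*2) (bits.insertIdx (idx-1) 0)
    else (bits, n)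

-- inner 'for j in range(index)' with state (i, summ); bits[i-1] is guarded by i ≤ n = len(bits)
def pvForA (bits : List Int) (n : Nat) : Nat → Nat → Int → Nat × Int
  | 0, i, s => (i, s)
  | c+1, i, s =>
    if i ≤ n then pvForA bits n c (i+1) (s + bits.getD (i-1) 0)
    else pvForA bits n c i s

-- inner 'while i <= bits_amount' (fuel: i grows by ≥ 2 per iteration, n+1 steps suffice)
def pvWhileA (bits : List Int) (n p : Nat) : Nat → Nat → Int → Int
  | 0, _, s => s
  | f+1, i, s =>
    if i ≤ n then
      let r := pvForA bits n p i s
      pvWhileA bits n p f (r.1 + p) r.2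
    else s

-- outer 'while index <= bits_amount' (fuel: index doubles, n+1 steps suffice; bits[index-1] = … is List.set)
def pvOuterA (n : Nat) : Nat → Nat → List Int → List Int
  | 0, _, bits => bits
  | f+1, p, bits =>
    if p ≤ n then pvOuterA n f (p*2) (bits.set (p-1) (PySem.Int.mod (pvWhileA bits n p (n+1) p 0) 2))
    else bits

def encode_hamming (bits : List Int) : List Int :=
  let r := pvInsA (bits.length + 2) bits.length 1 bits
  let b2 := pvOuterA r.2 (r.2 + 1) 1 r.1
  -- 'summ = 0; for i in range(bits_amount): summ += bits[i]' (i < bits_amount = len, so getD is exact)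
  let s := (List.range r.2).foldl (fun s i => s + b2.getD i 0) 0
  b2 ++ [PySem.Int.mod s 2]

-- ===== PORT B =====
-- same insertion loop as in Source B
def pvInsB : Nat → Nat → Nat → List Int → List Int × Nat
  | 0, n, _, bits => (bits, n)
  | f+1, n, idx, bits =>
    if idx ≤ n then pvInsB f (n+1) (idx*2) (bits.insertIdx (idx-1) 0)
    else (bits, n)

-- 'sum(bits[i - 1] for i in range(1, n + 1) if i & p)'
def pvGatherB (bits : List Int) (n p : Nat) : Int :=
  ((List.range' 1 n).filter (fun i => i &&& p != 0)).foldl (fun s i => s + bits.getD (i-1) 0) 0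

-- 'while p <= n: bits[p-1] = … % 2; p *= 2'
def pvOuterB (n : Nat) : Nat → Nat → List Int → List Int
  | 0, _, bits => bits
  | f+1, p, bits =>
    if p ≤ n then pvOuterB n f (p*2) (bits.set (p-1) (PySem.Int.mod (pvGatherB bits n p) 2))
    else bits

def encode_hamming_alt (bits : List Int) : List Int :=
  let r := pvInsB (bits.length + 2) bits.length 1 bits
  let b2 := pvOuterB r.2 (r.2 + 1) 1 r.1
  b2 ++ [PySem.Int.mod (b2.foldl (· + ·) 0) 2]

-- ===== PRECONDITION & SPEC =====
def Spec_encode_hamming (bits : List Int) (out : List Int) : Prop := out = encode_hamming_alt bits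
instance (bits : List Int) (out : List Int) : Decidable (Spec_encode_hamming bits out) := by unfold Spec_encode_hamming; infer_instance

-- ===== CLAIM (what is proved, stated in full; the proofs are below) =====
def Claim_equal_encode_hamming : Prop := ∀ (bits : List Int), Dom_encode_hamming bits → Spec_encode_hamming bits (encode_hamming bits)

-- ===== LEMMAS AND PROOFS =====

-- block sum Σ_{k=i}^{i+m-1} bits[k-1]
def pvBS (bits : List Int) : Nat → Nat → Int
  | 0, _ => 0
  | m+1, i => bits.getD (i-1) 0 + pvBS bits m (i+1)

-- masked tail sum Σ_{k=i}^{i+m-1} (if k &&& p ≠ 0 then bits[k-1] else 0)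
def pvR (bits : List Int) (p : Nat) : Nat → Nat → Int
  | 0, _ => 0
  | m+1, i => (if i &&& p != 0 then bits.getD (i-1) 0 else 0) + pvR bits p m (i+1)

theorem pvInsA_eq_pvInsB : ∀ (f n idx : Nat) (bits : List Int),
    pvInsA f n idx bits = pvInsB f n idx bits := by
  intro f
  induction f with
  | zero => intro n idx bits; rfl
  | succ f ih =>
    intro n idx bits
    simp only [pvInsA, pvInsB]
    split
    · exact ih _ _ _
    · rfl

theorem pvInsA_len : ∀ (f n idx : Nat) (bits : List Int), bits.length = n →
    ((pvInsA f n idx bits).1).length = (pvInsA f n idx bits).2 := by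
  intro f
  induction f with
  | zero => intro n idx bits h; simpa [pvInsA]
  | succ f ih =>
    intro n idx bits h
    subst h
    simp only [pvInsA]
    split
    · rename_i hle
      apply ih
      simp [List.length_insertIdx]
      omega
    · rfl

theorem pvOuterB_len (n : Nat) : ∀ (f p : Nat) (bits : List Int),
    (pvOuterB n f p bits).length = bits.length := by
  intro f
  induction f with
  | zero => intro p bits; rfl
  | succ f ih =>
    intro p bits
    simp only [pvOuterB]
    split
    · rw [ih]; simp
    · rfl

theorem pvForA_spec (bits : List Int) (n : Nat) :
    ∀ (c i : Nat) (s : Int), i ≤ n + 1 →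
    pvForA bits n c i s = (min (i+c) (n+1), s + pvBS bits (min (i+c) (n+1) - i) i) := by
  intro c
  induction c with
  | zero =>
    intro i s h
    simp [pvForA, pvBS]
    omega
  | succ c ih =>
    intro i s h
    simp only [pvForA]
    split
    · rename_i hin
      rw [ih (i+1) _ (by omega)]
      have hm : min (i+1+c) (n+1) = min (i+(c+1)) (n+1) := by omega
      have hk : min (i+(c+1)) (n+1) - i = (min (i+1+c) (n+1) - (i+1)) + 1 := by omega
      rw [hm, hk]
      simp only [pvBS]
      rw [hm]
      simp [add_assoc]
    · rename_i hin
      have hi : i = n + 1 := by omega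
      rw [ih i s h]
      have h1 : min (i+c) (n+1) = n+1 := by omega
      have h2 : min (i+(c+1)) (n+1) = n+1 := by omega
      rw [h1, h2]

theorem pvR_split (bits : List Int) (p : Nat) :
    ∀ (a b i : Nat), pvR bits p (a+b) i = pvR bits p a i + pvR bits p b (i+a) := by
  intro a
  induction a with
  | zero => intro b i; simp [pvR]
  | succ a ih =>
    intro b i
    have : a + 1 + b = (a + b) + 1 := by omega
    rw [this]
    simp only [pvR]
    rw [ih b (i+1)]
    have : i + 1 + a = i + (a+1) := by omega
    rw [this]
    ring

theorem pvR_true (bits : List Int) (p : Nat) :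
    ∀ (m i : Nat), (∀ k, k < m → ((i+k) &&& p != 0) = true) →
    pvR bits p m i = pvBS bits m i := by
  intro m
  induction m with
  | zero => intro i h; rfl
  | succ m ih =>
    intro i h
    simp only [pvR, pvBS]
    have h0 := h 0 (by omega)
    simp at h0
    rw [if_pos (by simpa using h0), ih (i+1) (fun k hk => by
      have := h (k+1) (by omega)
      simpa [Nat.add_assoc, Nat.add_comm 1 k] using this)]

theorem pvR_false (bits : List Int) (p : Nat) :
    ∀ (m i : Nat), (∀ k, k < m → ((i+k) &&& p != 0) = false) →
    pvR bits p m i = 0 := by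
  intro m
  induction m with
  | zero => intro i h; rfl
  | succ m ih =>
    intro i h
    simp only [pvR]
    have h0 := h 0 (by omega)
    simp at h0
    rw [if_neg (by simp [h0]), ih (i+1) (fun k hk => by
      have := h (k+1) (by omega)
      simpa [Nat.add_assoc, Nat.add_comm 1 k] using this)]
    simp

-- the bitmask test against a power of two, as a statement about j mod 2p
theorem chi_eq (a j : Nat) : (j &&& 2^a != 0) = decide (2^a ≤ j % (2^a * 2)) := by
  have hmm : j % (2^a * 2) = j % 2^a + 2^a * (j / 2^a % 2) := Nat.mod_mul
  have h1 : j % 2^a < 2^a := Nat.mod_lt _ (Nat.two_pow_pos a)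
  have h2 : j / 2^a % 2 < 2 := Nat.mod_lt _ (by norm_num)
  by_cases hb : j / 2^a % 2 = 1
  · rw [hb] at hmm
    simp [Nat.and_two_pow, Nat.testBit_eq_decide_div_mod_eq, hb, hmm]
  · have hb0 : j / 2^a % 2 = 0 := by omega
    rw [hb0] at hmm
    simp [Nat.and_two_pow, Nat.testBit_eq_decide_div_mod_eq, hb0, hmm]
    all_goals omega

theorem chi_true_of (a j : Nat) (h : 2^a ≤ j % (2^a * 2)) : (j &&& 2^a != 0) = true := by
  rw [chi_eq]; simpa

theorem chi_false_of (a j : Nat) (h : j % (2^a * 2) < 2^a) : (j &&& 2^a != 0) = false := by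
  rw [chi_eq]; simp; omega

theorem chiC1 (a i k : Nat) (hmod : i % (2^a*2) = 2^a) (hk : k < 2^a) :
    ((i+k) &&& 2^a != 0) = true := by
  have hq := Nat.div_add_mod i (2^a*2)
  have hik : i + k = (2^a + k) + (2^a*2) * (i / (2^a*2)) := by omega
  apply chi_true_of
  rw [hik, Nat.add_mul_mod_self_left, Nat.mod_eq_of_lt (by omega)]
  omega

theorem chiC2 (a i k : Nat) (hmod : i % (2^a*2) = 2^a) (hk : k < 2^a) :
    ((i + 2^a + k) &&& 2^a != 0) = false := by
  have hq := Nat.div_add_mod i (2^a*2)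
  have hexp : (2^a*2) * (i / (2^a*2) + 1) = (2^a*2) * (i / (2^a*2)) + 2^a*2 := by ring
  have hik : i + 2^a + k = k + (2^a*2) * (i / (2^a*2) + 1) := by omega
  apply chi_false_of
  rw [hik, Nat.add_mul_mod_self_left, Nat.mod_eq_of_lt (by omega)]
  exact hk

theorem pvR_block (bits : List Int) (a i m : Nat) (hmod : i % (2^a*2) = 2^a) (hm : 2^a ≤ m) :
    pvR bits (2^a) m i = pvBS bits (2^a) i + pvR bits (2^a) (m - 2^a*2) (i + 2^a*2) := by
  obtain ⟨r, rfl⟩ : ∃ r, m = 2^a + r := ⟨m - 2^a, by omega⟩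
  rw [pvR_split]
  rw [pvR_true bits (2^a) (2^a) i (fun k hk => chiC1 a i k hmod hk)]
  by_cases hr : r ≤ 2^a
  · have h2 : pvR bits (2^a) r (i + 2^a) = 0 :=
      pvR_false bits (2^a) r (i + 2^a) (fun k hk => chiC2 a i k hmod (by omega))
    have h3 : 2^a + r - 2^a*2 = 0 := by omega
    rw [h2, h3]
    simp [pvR]
  · obtain ⟨t, rfl⟩ : ∃ t, r = 2^a + t := ⟨r - 2^a, by omega⟩
    rw [pvR_split]
    rw [pvR_false bits (2^a) (2^a) (i + 2^a) (fun k hk => chiC2 a i k hmod hk)]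
    have h3 : 2^a + (2^a + t) - 2^a*2 = t := by omega
    have h4 : i + 2^a + 2^a = i + 2^a*2 := by omega
    rw [h3, h4]
    ring

theorem pvWhileA_spec (bits : List Int) (n a : Nat) :
    ∀ (f i : Nat) (s : Int), (i % (2^a * 2) = 2^a ∨ n + 1 ≤ i) → n + 1 ≤ i + f →
    pvWhileA bits n (2^a) f i s = s + pvR bits (2^a) (n+1-i) i := by
  intro f
  induction f with
  | zero =>
    intro i s hd hf
    have h0 : n + 1 - i = 0 := by omega
    simp [pvWhileA, h0, pvR]
  | succ f ih =>
    intro i s hd hf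
    simp only [pvWhileA]
    split
    · rename_i hin
      have hp : 0 < 2^a := Nat.two_pow_pos a
      have hmod : i % (2^a * 2) = 2^a := by
        rcases hd with h | h
        · exact h
        · omega
      have hq := Nat.div_add_mod i (2^a * 2)
      rw [pvForA_spec bits n (2^a) i s (by omega)]
      simp only
      by_cases hb : i + 2^a ≤ n + 1
      · have hmin : min (i + 2^a) (n+1) = i + 2^a := by omega
        rw [hmin]
        have harg : i + 2^a - i = 2^a := by omega
        rw [harg]
        have hnext : (i + 2^a + 2^a) % (2^a * 2) = 2^a := by
          have hexp : (2^a*2) * (i / (2^a*2) + 1) = (2^a*2) * (i / (2^a*2)) + 2^a*2 := by ring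
          have hik : i + 2^a + 2^a = 2^a + (2^a*2) * (i / (2^a*2) + 1) := by omega
          rw [hik, Nat.add_mul_mod_self_left, Nat.mod_eq_of_lt (by omega)]
        rw [ih (i + 2^a + 2^a) _ (Or.inl hnext) (by omega)]
        rw [pvR_block bits a i (n+1-i) hmod (by omega)]
        have h5 : n + 1 - (i + 2^a + 2^a) = n + 1 - i - 2^a*2 := by omega
        have h6 : i + 2^a + 2^a = i + 2^a*2 := by omega
        rw [h5, h6]
        ring
      · have hmin : min (i + 2^a) (n+1) = n+1 := by omega
        rw [hmin]
        rw [ih (n+1+2^a) _ (Or.inr (by omega)) (by omega)]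
        have h0 : n + 1 - (n+1+2^a) = 0 := by omega
        rw [h0]
        rw [pvR_true bits (2^a) (n+1-i) i (fun k hk => chiC1 a i k hmod (by omega))]
        simp [pvR]
    · rename_i hin
      have h0 : n + 1 - i = 0 := by omega
      simp [h0, pvR]

theorem pvGather_aux (bits : List Int) (p : Nat) :
    ∀ (m i : Nat) (s : Int),
    ((List.range' i m).filter (fun j => j &&& p != 0)).foldl (fun s j => s + bits.getD (j-1) 0) s
      = s + pvR bits p m i := by
  intro m
  induction m with
  | zero => intro i s; simp [pvR]
  | succ m ih =>
    intro i s
    rw [List.range'_succ]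
    simp only [List.filter_cons, pvR]
    by_cases hc : (i &&& p != 0) = true
    · rw [if_pos hc, List.foldl_cons, ih (i+1) _, if_pos hc]
      ring
    · rw [if_neg hc, ih (i+1) _, if_neg hc]
      ring

theorem pvGatherB_spec (bits : List Int) (n p : Nat) :
    pvGatherB bits n p = pvR bits p n 1 := by
  unfold pvGatherB
  rw [pvGather_aux bits p n 1 0]
  ring

theorem pvPower_eq (bits : List Int) (n a : Nat) (h : 2^a ≤ n) :
    pvWhileA bits n (2^a) (n+1) (2^a) 0 = pvGatherB bits n (2^a) := by
  have hp : 0 < 2^a := Nat.two_pow_pos a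
  have hmod : (2^a) % (2^a*2) = 2^a := Nat.mod_eq_of_lt (by omega)
  rw [pvWhileA_spec bits n a (n+1) (2^a) 0 (Or.inl hmod) (by omega)]
  rw [pvGatherB_spec]
  have hdec : n = (2^a - 1) + (n + 1 - 2^a) := by omega
  conv_rhs => rw [hdec]
  rw [pvR_split]
  rw [pvR_false bits (2^a) (2^a - 1) 1 (fun k hk => by
    apply chi_false_of
    rw [Nat.mod_eq_of_lt (by omega)]
    omega)]
  have h1 : 1 + (2^a - 1) = 2^a := by omega
  rw [h1]

theorem pvOuterA_eq_pvOuterB (n : Nat) :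
    ∀ (f a : Nat) (bits : List Int), pvOuterA n f (2^a) bits = pvOuterB n f (2^a) bits := by
  intro f
  induction f with
  | zero => intro a bits; rfl
  | succ f ih =>
    intro a bits
    simp only [pvOuterA, pvOuterB]
    split
    · rename_i hle
      rw [pvPower_eq bits n a hle]
      have h2 : 2^a * 2 = 2^(a+1) := by rw [pow_succ]
      rw [h2, ih (a+1)]
    · rfl

theorem pvSum_range_eq (l : List Int) (n : Nat) (h : l.length = n) :
    ∀ (s : Int), (List.range n).foldl (fun s i => s + l.getD i 0) s = l.foldl (· + ·) s := by
  subst h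
  induction l using List.reverseRecOn with
  | nil => intro s; simp
  | append_singleton xs x ih =>
    intro s
    have hl : (xs ++ [x]).length = xs.length + 1 := by simp
    rw [hl, List.range_succ, List.foldl_append, List.foldl_append]
    rw [PySem.List.foldl_congr_mem (List.range xs.length)
      (fun s i => s + (xs ++ [x]).getD i 0) (fun s i => s + xs.getD i 0) s
      (fun acc i hi => by
        show acc + (xs ++ [x]).getD i 0 = acc + xs.getD i 0
        rw [List.getD_append xs [x] 0 i (List.mem_range.mp hi)])]
    rw [ih s]
    simp

theorem encode_eq (bits : List Int) : encode_hamming bits = encode_hamming_alt bits := by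
  have hins := pvInsA_eq_pvInsB (bits.length + 2) bits.length 1 bits
  have hlen := pvInsA_len (bits.length + 2) bits.length 1 bits rfl
  simp only [encode_hamming, encode_hamming_alt, ← hins]
  rcases hE : pvInsA (bits.length + 2) bits.length 1 bits with ⟨L, n⟩
  rw [hE] at hlen
  simp only
  have h1 := pvOuterA_eq_pvOuterB n (n+1) 0 L
  simp only [pow_zero] at h1
  rw [h1]
  have hB2 : (pvOuterB n (n+1) 1 L).length = n := by rw [pvOuterB_len]; exact hlen
  rw [pvSum_range_eq (pvOuterB n (n+1) 1 L) n hB2]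

-- ===== VERDICT (by name: the statement is the Claim_ definition above) =====
theorem encode_hamming_spec : Claim_equal_encode_hamming := by
  intro bits _
  unfold Spec_encode_hamming
  exact encode_eq bits
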